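-- pv_equiv track=rewrite | github.com/segadevelop/Python | GUI_Scripts/Templates/cryptography.py | typex_stageTwo
-- ===== SOURCE A (Python) =====
-- def typex_stageTwo(mode, message, final = ""):
--     rotors = (
--         (10,24,14,12,23,2,7,15,24,2,7,5,22,6,2,1,22,12,6,9,7,2,11,23,14,2),
--         (1,7,11,26,12,5,11,20,11,7,18,6,17,18,19,1,13,5,2,9,11,13,6,17,26,24),
--         (9,1,21,6,4,19,25,6,17,10,26,1,23,6,1,17,19,17,25,21,3,21,17,1,18,20)
--     )
--     X,Y,Z = 2,0,1; x,y,z = 1,2,3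
--     for symbol in message:
--         rotor = rotors[X][x] + rotors[Y][y] + rotors[Z][z]
--         if mode == 'E':
--             if symbol in [chr(x) for x in range(65,91)]:
--                 final += chr((ord(symbol) - 13 + rotor)%26 + ord('A'))
--             else: continue
--         else:
--             final += chr((ord(symbol) - 13 - rotor)%26 + ord('A'))
--         if x != 25: x += 1
--         else:
--             x = 0
--             if y != 25: y += 1
--             else:
--                 y = 0
--                 if z != 25: z += 1
--                 else: z = 0
--     return final
-- ===== SOURCE B (Python) =====
-- def typex_stageTwo(mode, message, final = ""):
--     rotors = (
--         (10,24,14,12,23,2,7,15,24,2,7,5,22,6,2,1,22,12,6,9,7,2,11,23,14,2),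
--         (1,7,11,26,12,5,11,20,11,7,18,6,17,18,19,1,13,5,2,9,11,13,6,17,26,24),
--         (9,1,21,6,4,19,25,6,17,10,26,1,23,6,1,17,19,17,25,21,3,21,17,1,18,20)
--     )
--     if mode == 'E':
--         kept = [ch for ch in message if 'A' <= ch <= 'Z']
--         sign = 1
--     else:
--         kept = list(message)
--         sign = -1
--     def block(chunk, x0, y, z):
--         base = rotors[0][y] + rotors[1][z]
--         return ''.join(chr((ord(ch) - 13 + sign * (rotors[2][x0 + i] + base)) % 26 + 65)
--                        for i, ch in enumerate(chunk))
--     parts = [block(kept[:25], 1, 2, 3)]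
--     y, z = 3, 3
--     for pos in range(25, len(kept), 26):
--         parts.append(block(kept[pos:pos + 26], 0, y, z))
--         y += 1
--         if y == 26:
--             y = 0
--             z = (z + 1) % 26
--     return final + ''.join(parts)
-- ===== Notes on version B (the rewrite author's own statement) =====
-- stated objective: alternative
-- what changed: Replaced A's single character-at-a-time loop with a mutating x/y/z odometer by a staged pipeline: a filter pass builds the list of characters to substitute, which is then processed in blocks (one partial block of 25, then 26-char blocks) with the fast rotor index derived from the position inside the block and the slow rotors' sum hoisted out as a per-block constant.
import Mathlib
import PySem

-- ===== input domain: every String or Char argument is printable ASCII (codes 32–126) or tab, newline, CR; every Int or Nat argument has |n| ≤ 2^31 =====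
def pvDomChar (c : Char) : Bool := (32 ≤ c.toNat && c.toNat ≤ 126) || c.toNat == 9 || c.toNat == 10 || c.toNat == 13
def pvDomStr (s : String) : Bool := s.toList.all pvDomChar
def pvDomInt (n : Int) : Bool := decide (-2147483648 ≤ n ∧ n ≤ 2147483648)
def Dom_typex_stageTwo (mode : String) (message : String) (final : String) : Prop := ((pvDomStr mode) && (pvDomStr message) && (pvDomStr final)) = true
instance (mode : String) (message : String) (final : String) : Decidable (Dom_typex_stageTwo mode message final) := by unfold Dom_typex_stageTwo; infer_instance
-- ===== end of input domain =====

-- B re-stages A's single stateful odometer loop as a filter pass followed by block-wise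
-- substitution (one 25-char block then 26-char blocks, slow-rotor sum hoisted per block); objective: alternative decomposition, same cost.


-- ===== PORT A =====
def pvRot0 : List Int := [10,24,14,12,23,2,7,15,24,2,7,5,22,6,2,1,22,12,6,9,7,2,11,23,14,2]
def pvRot1 : List Int := [1,7,11,26,12,5,11,20,11,7,18,6,17,18,19,1,13,5,2,9,11,13,6,17,26,24]
def pvRot2 : List Int := [9,1,21,6,4,19,25,6,17,10,26,1,23,6,1,17,19,17,25,21,3,21,17,1,18,20]
-- [chr(x) for x in range(65,91)]
def pvUpper : List Char := (PySem.List.pyRange 65 91 1).map (fun i => Char.ofNat i.toNat)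
-- the nested if/else stepping of (x, y, z) at the end of A's loop body
def pvAStep (x y z : Nat) : Nat × Nat × Nat :=
  if x ≠ 25 then (x + 1, y, z)
  else if y ≠ 25 then (0, y + 1, z)
  else if z ≠ 25 then (0, 0, z + 1)
  else (0, 0, 0)
-- A's per-character loop; indices x y z always lie in [0,25], so List.getD is exact for rotors[·][·]
def pvALoop (mode : String) : List Char → Nat → Nat → Nat → List Char → List Char
  | [], _, _, _, acc => acc
  | s :: rest, x, y, z, acc =>
    let rotor : Int := pvRot2.getD x 0 + pvRot0.getD y 0 + pvRot1.getD z 0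
    if mode = "E" then
      if s ∈ pvUpper then
        let p := pvAStep x y z
        pvALoop mode rest p.1 p.2.1 p.2.2
          (acc ++ [Char.ofNat ((PySem.Int.mod ((s.toNat : Int) - 13 + rotor) 26) + 65).toNat])
      else pvALoop mode rest x y z acc   -- continue: no stepping
    else
      let p := pvAStep x y z
      pvALoop mode rest p.1 p.2.1 p.2.2
        (acc ++ [Char.ofNat ((PySem.Int.mod ((s.toNat : Int) - 13 - rotor) 26) + 65).toNat])

def typex_stageTwo (mode : String) (message : String) (final : String) : String :=
  String.ofList (pvALoop mode message.toList 1 2 3 final.toList)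

-- ===== PORT B =====
-- one block: substitute chunk with fast-rotor index x0+i and hoisted base = rotors[0][y]+rotors[1][z]
def pvBlock (sign base : Int) : Nat → List Char → List Char
  | _, [] => []
  | x, ch :: rest =>
    Char.ofNat ((PySem.Int.mod ((ch.toNat : Int) - 13 + sign * (pvRot2.getD x 0 + base)) 26) + 65).toNat
      :: pvBlock sign base (x + 1) rest
-- the for-pos loop over 26-char blocks, advancing (y, z) once per block
def pvBlocks (sign : Int) : List Char → Nat → Nat → List Char
  | [], _, _ => []
  | c :: t, y, z =>
    pvBlock sign (pvRot0.getD y 0 + pvRot1.getD z 0) 0 ((c :: t).take 26)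
      ++ pvBlocks sign ((c :: t).drop 26) (if y + 1 = 26 then 0 else y + 1) (if y + 1 = 26 then (z + 1) % 26 else z)
  termination_by kept => kept.length
  decreasing_by simp only [List.length_drop, List.length_cons]; omega

def typex_stageTwo_alt (mode : String) (message : String) (final : String) : String :=
  let sign : Int := if mode = "E" then 1 else -1
  let kept : List Char :=
    if mode = "E" then message.toList.filter (fun ch => decide ('A' ≤ ch ∧ ch ≤ 'Z'))
    else message.toList
  String.ofList (final.toList
    ++ pvBlock sign (pvRot0.getD 2 0 + pvRot1.getD 3 0) 1 (kept.take 25)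
    ++ pvBlocks sign (kept.drop 25) 3 3)

-- ===== PRECONDITION & SPEC =====
def Spec_typex_stageTwo (mode : String) (message : String) (final : String) (out : String) : Prop := out = typex_stageTwo_alt mode message final
instance (mode : String) (message : String) (final : String) (out : String) : Decidable (Spec_typex_stageTwo mode message final out) := by unfold Spec_typex_stageTwo; infer_instance

-- ===== CLAIM (what is proved, stated in full; the proofs are below) =====
def Claim_equal_typex_stageTwo : Prop := ∀ (mode : String) (message : String) (final : String), Dom_typex_stageTwo mode message final → Spec_typex_stageTwo mode message final (typex_stageTwo mode message final)

-- ===== LEMMAS AND PROOFS =====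

-- common core: A's loop with the guard/continue resolved and the shift signed
def pvCore (sign : Int) : List Char → Nat → Nat → Nat → List Char → List Char
  | [], _, _, _, acc => acc
  | s :: rest, x, y, z, acc =>
    let rotor : Int := pvRot2.getD x 0 + pvRot0.getD y 0 + pvRot1.getD z 0
    let p := pvAStep x y z
    pvCore sign rest p.1 p.2.1 p.2.2
      (acc ++ [Char.ofNat ((PySem.Int.mod ((s.toNat : Int) - 13 + sign * rotor) 26) + 65).toNat])

-- state of A's odometer after a block of `len` characters starting at fast position x
def pvPost (x len y z : Nat) : Nat × Nat × Nat :=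
  if x + len = 26 then pvAStep 25 y z else (x + len, y, z)

-- A's guard list is exactly the uppercase band 65..90
lemma pv_mem_upper (s : Char) : s ∈ pvUpper ↔ (65 ≤ s.toNat ∧ s.toNat ≤ 90) := by
  have h : pvUpper = ['A','B','C','D','E','F','G','H','I','J','K','L','M',
                      'N','O','P','Q','R','S','T','U','V','W','X','Y','Z'] := by decide
  rw [h]
  constructor
  · intro hm; fin_cases hm <;> decide
  · rintro ⟨h1, h2⟩
    have hs : s = Char.ofNat s.toNat := (Char.ofNat_toNat s).symm
    rw [hs]
    interval_cases h : s.toNat <;> decide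

-- B's filter guard equals A's in Nat terms
lemma pv_guard (s : Char) : ('A' ≤ s ∧ s ≤ 'Z') ↔ (65 ≤ s.toNat ∧ s.toNat ≤ 90) := by
  simp [Char.le_def, UInt32.le_iff_toNat_le]

lemma pv_a_core_E (msg : List Char) : ∀ (x y z : Nat) (acc : List Char),
    pvALoop "E" msg x y z acc
      = pvCore 1 (msg.filter (fun ch => decide ('A' ≤ ch ∧ ch ≤ 'Z'))) x y z acc := by
  induction msg with
  | nil => intro x y z acc; rfl
  | cons s rest ih =>
    intro x y z acc
    by_cases hu : 65 ≤ s.toNat ∧ s.toNat ≤ 90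
    · have hf : decide ('A' ≤ s ∧ s ≤ 'Z') = true := by
        rw [decide_eq_true_iff]; exact (pv_guard s).mpr hu
      simp only [pvALoop, if_pos ((pv_mem_upper s).mpr hu),
        List.filter_cons, hf, if_true, pvCore, one_mul]
      exact ih _ _ _ _
    · have hf : decide ('A' ≤ s ∧ s ≤ 'Z') = false := by
        rw [decide_eq_false_iff_not]; exact fun h => hu ((pv_guard s).mp h)
      simp only [pvALoop, if_neg (fun hmem => hu ((pv_mem_upper s).mp hmem)),
        List.filter_cons, hf, Bool.false_eq_true, if_false]
      exact ih _ _ _ _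

lemma pv_a_core_D (mode : String) (hm : mode ≠ "E") (msg : List Char) :
    ∀ (x y z : Nat) (acc : List Char),
      pvALoop mode msg x y z acc = pvCore (-1) msg x y z acc := by
  induction msg with
  | nil => intro x y z acc; rfl
  | cons s rest ih =>
    intro x y z acc
    simp only [pvALoop, if_neg hm, pvCore, neg_one_mul, sub_eq_add_neg]
    exact ih _ _ _ _

-- the accumulator commutes out of pvCore
lemma pv_core_acc (sign : Int) (msg : List Char) : ∀ (x y z : Nat) (acc : List Char),
    pvCore sign msg x y z acc = acc ++ pvCore sign msg x y z [] := by
  induction msg with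
  | nil => intro x y z acc; simp [pvCore]
  | cons s rest ih =>
    intro x y z acc
    simp only [pvCore]
    rw [ih _ _ _ (acc ++ _), ih _ _ _ ([] ++ _)]
    simp

-- processing one block inside pvCore
lemma pv_inner (sign : Int) : ∀ (chunk rest : List Char) (x y z : Nat) (acc : List Char),
    x + chunk.length ≤ 26 → x ≤ 25 →
    pvCore sign (chunk ++ rest) x y z acc
      = pvCore sign rest (pvPost x chunk.length y z).1 (pvPost x chunk.length y z).2.1
          (pvPost x chunk.length y z).2.2
          (acc ++ pvBlock sign (pvRot0.getD y 0 + pvRot1.getD z 0) x chunk) := by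
  intro chunk
  induction chunk with
  | nil =>
    intro rest x y z acc h hx
    have h26 : x ≠ 26 := by omega
    simp [pvPost, pvBlock, h26]
  | cons c chunk' ih =>
    intro rest x y z acc h hx
    by_cases h25 : x = 25
    · subst h25
      have hlen : chunk' = [] := by
        have h0 : chunk'.length = 0 := by simp at h; omega
        exact List.length_eq_zero_iff.mp h0
      subst hlen
      have h26 : (25 : Nat) + ([c] : List Char).length = 26 := by simp
      simp only [List.cons_append, List.nil_append, pvCore, pvPost, if_pos h26, pvBlock]
      simp [add_assoc]
    · have step : pvAStep x y z = (x + 1, y, z) := by unfold pvAStep; rw [if_pos h25]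
      simp only [List.cons_append, pvCore, step]
      rw [ih rest (x + 1) y z _ (by simp at h ⊢; omega) (by omega)]
      have hl : pvPost (x + 1) chunk'.length y z = pvPost x (c :: chunk').length y z := by
        unfold pvPost
        have : x + 1 + chunk'.length = x + (c :: chunk').length := by simp; omega
        rw [this]
      rw [hl]
      simp [pvBlock, add_assoc]

-- the wrap of A's odometer at the end of a full block equals B's per-block (y, z) update
lemma pv_wrap (y z : Nat) (hy : y ≤ 25) (hz : z ≤ 25) :
    pvAStep 25 y z
      = (0, (if y + 1 = 26 then 0 else y + 1), (if y + 1 = 26 then (z + 1) % 26 else z)) := by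
  unfold pvAStep
  rw [if_neg (by simp : ¬ ((25 : Nat) ≠ 25))]
  by_cases hy25 : y = 25
  · subst hy25
    rw [if_neg (by simp : ¬ ((25 : Nat) ≠ 25))]
    by_cases hz25 : z = 25
    · subst hz25
      rw [if_neg (by simp : ¬ ((25 : Nat) ≠ 25))]
      norm_num
    · rw [if_pos hz25]
      have h26 : (25 : Nat) + 1 = 26 := rfl
      rw [h26, if_pos rfl, if_pos rfl, Nat.mod_eq_of_lt (by omega)]
  · rw [if_pos hy25]
    have h26 : y + 1 ≠ 26 := by omega
    rw [if_neg h26, if_neg h26]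

lemma pv_blocks (sign : Int) : ∀ (n : Nat) (kept : List Char), kept.length ≤ n →
    ∀ (y z : Nat), y ≤ 25 → z ≤ 25 →
    pvCore sign kept 0 y z [] = pvBlocks sign kept y z := by
  intro n
  induction n with
  | zero =>
    intro kept hlen y z hy hz
    have hk : kept = [] := List.eq_nil_of_length_eq_zero (by omega)
    subst hk; simp [pvCore, pvBlocks]
  | succ n ih =>
    intro kept hlen y z hy hz
    cases kept with
    | nil => simp [pvCore, pvBlocks]
    | cons c t =>
      have hi := pv_inner sign ((c :: t).take 26) ((c :: t).drop 26) 0 y z []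
        (by simp [List.length_take]) (by omega)
      rw [List.take_append_drop] at hi
      rw [hi, List.nil_append]
      rw [show pvBlocks sign (c :: t) y z
            = pvBlock sign (pvRot0.getD y 0 + pvRot1.getD z 0) 0 ((c :: t).take 26)
                ++ pvBlocks sign ((c :: t).drop 26) (if y + 1 = 26 then 0 else y + 1)
                    (if y + 1 = 26 then (z + 1) % 26 else z) from by rw [pvBlocks]]
      by_cases h26 : 0 + ((c :: t).take 26).length = 26
      · have hP : pvPost 0 ((c :: t).take 26).length y z
            = (0, (if y + 1 = 26 then 0 else y + 1), (if y + 1 = 26 then (z + 1) % 26 else z)) := by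
          unfold pvPost; rw [if_pos h26]; exact pv_wrap y z hy hz
        rw [hP, pv_core_acc]
        rw [ih ((c :: t).drop 26) (by simp [List.length_drop] at hlen ⊢; omega) _ _
          (by split_ifs <;> simp <;> omega)
          (by split_ifs <;> simp <;> omega)]
      · have hlt : (c :: t).length < 26 := by
          simp [List.length_take] at h26 ⊢; omega
        have hP : pvPost 0 ((c :: t).take 26).length y z = (0 + ((c :: t).take 26).length, y, z) := by
          unfold pvPost; rw [if_neg h26]
        have hdrop : (c :: t).drop 26 = [] := List.drop_eq_nil_of_le (by omega)
        rw [hP, hdrop]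
        simp [pvCore, pvBlocks]

-- splitting off the first (25-char) block
lemma pv_split (sign : Int) (kept : List Char) :
    pvCore sign kept 1 2 3 []
      = pvBlock sign (pvRot0.getD 2 0 + pvRot1.getD 3 0) 1 (kept.take 25)
          ++ pvBlocks sign (kept.drop 25) 3 3 := by
  have hi := pv_inner sign (kept.take 25) (kept.drop 25) 1 2 3 []
    (by simp [List.length_take]; omega) (by omega)
  rw [List.take_append_drop] at hi
  rw [hi, List.nil_append]
  by_cases h26 : 1 + (kept.take 25).length = 26
  · have hP : pvPost 1 (kept.take 25).length 2 3 = (0, 3, 3) := by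
      unfold pvPost; rw [if_pos h26]; decide
    rw [hP, pv_core_acc]
    rw [pv_blocks sign (kept.drop 25).length (kept.drop 25) le_rfl 3 3 (by omega) (by omega)]
  · have hP : pvPost 1 (kept.take 25).length 2 3 = (1 + (kept.take 25).length, 2, 3) := by
      unfold pvPost; rw [if_neg h26]
    have hdrop : kept.drop 25 = [] := by
      have : kept.length < 25 := by simp [List.length_take] at h26 ⊢; omega
      exact List.drop_eq_nil_of_le (by omega)
    rw [hP, hdrop]
    simp [pvCore, pvBlocks]

-- ===== VERDICT (by name: the statement is the Claim_ definition above) =====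
theorem typex_stageTwo_spec : Claim_equal_typex_stageTwo := by
  intro mode message final _
  simp only [Spec_typex_stageTwo, typex_stageTwo, typex_stageTwo_alt]
  by_cases hm : mode = "E"
  · subst hm
    rw [pv_a_core_E, pv_core_acc, pv_split, List.append_assoc]
    simp
  · simp only [if_neg hm]
    rw [pv_a_core_D mode hm, pv_core_acc, pv_split, List.append_assoc]
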